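-- pv_equiv track=rewrite | github.com/ruchirK/python-differential | differential-collection.py | collection_sum
-- ===== SOURCE A (Python) =====
-- from collections import defaultdict
--
-- def collection_consolidate(a):
--     consolidated = defaultdict(int)
--     for (data, diff) in a:
--         consolidated[data] += diff
--     return [(data, diff) for (data, diff) in consolidated.items() if diff != 0]
--
-- def collection_reduce(a, f):
--     keys = defaultdict(list)
--     out = []
--     for ((key, val), diff) in a:
--         keys[key].append((val, diff))
--     for (key, vals) in keys.items():
--         results = f(vals)
--         for (val, diff) in results:
--             out.append(((key, val), diff))
--     return collection_consolidate(out)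
--
-- def collection_sum(a):
--     def sum_inner(vals):
--         out = 0
--         for (val, diff) in vals:
--             out += (val * diff)
--
--         if out != 0:
--             return [(out, 1)]
--         else:
--             return []
--
--     return collection_reduce(a, sum_inner)
-- ===== SOURCE B (Python) =====
-- def collection_sum(a):
--     sums = {}
--     for ((key, val), diff) in a:
--         sums[key] = sums.get(key, 0) + val * diff
--     return [((key, total), 1) for (key, total) in sums.items() if total != 0]
-- ===== Notes on version B (the rewrite author's own statement) =====
-- stated objective: simpler
-- what changed: Replaced the collection_reduce/collection_consolidate/sum_inner pipeline (group into a defaultdict of lists, reduce each group, then re-consolidate the output) by one pass that accumulates val*diff per key in a single dict and emits ((key,total),1) for nonzero totals; the consolidation step is provably a no-op because keys are distinct.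
import Mathlib
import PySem

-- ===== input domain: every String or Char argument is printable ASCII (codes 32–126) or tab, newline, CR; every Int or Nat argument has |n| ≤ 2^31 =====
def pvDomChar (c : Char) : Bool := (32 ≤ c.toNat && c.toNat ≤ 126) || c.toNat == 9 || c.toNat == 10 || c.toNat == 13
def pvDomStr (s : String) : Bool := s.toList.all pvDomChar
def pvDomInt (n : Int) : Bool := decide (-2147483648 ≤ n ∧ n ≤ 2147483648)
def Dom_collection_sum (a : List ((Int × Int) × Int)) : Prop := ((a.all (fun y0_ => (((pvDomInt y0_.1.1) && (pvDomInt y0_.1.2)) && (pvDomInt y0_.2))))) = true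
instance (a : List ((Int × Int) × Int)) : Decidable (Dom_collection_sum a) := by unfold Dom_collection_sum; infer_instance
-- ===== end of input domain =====

-- B replaces A's group/reduce/consolidate pipeline by a single per-key accumulating dict (simpler decomposition; same result).

-- ===== PORT A =====
def collection_consolidate (a : List ((Int × Int) × Int)) : List ((Int × Int) × Int) :=
  let consolidated := a.foldl (fun d p => d.modify p.1 0 (· + p.2)) PySem.Dict.empty
  consolidated.items.filter (fun p => p.2 != 0)

def collection_reduce (a : List ((Int × Int) × Int))
    (f : List (Int × Int) → List (Int × Int)) : List ((Int × Int) × Int) :=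
  let keys := a.foldl (fun d p => d.modify p.1.1 [] (· ++ [(p.1.2, p.2)])) PySem.Dict.empty
  let out := keys.items.foldl
    (fun out kv => out ++ (f kv.2).map (fun vd => ((kv.1, vd.1), vd.2))) []
  collection_consolidate out

def collection_sum (a : List ((Int × Int) × Int)) : List ((Int × Int) × Int) :=
  collection_reduce a (fun vals =>
    let out := vals.foldl (fun s p => s + p.1 * p.2) 0
    if out != 0 then [(out, 1)] else [])

-- ===== PORT B =====
def collection_sum_alt (a : List ((Int × Int) × Int)) : List ((Int × Int) × Int) :=
  let sums := a.foldl (fun d p => d.insert p.1.1 (d.getD p.1.1 0 + p.1.2 * p.2)) PySem.Dict.empty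
  (sums.items.filter (fun kt => kt.2 != 0)).map (fun kt => ((kt.1, kt.2), 1))

-- ===== PRECONDITION & SPEC =====
def Spec_collection_sum (a : List ((Int × Int) × Int)) (out : List ((Int × Int) × Int)) : Prop := out = collection_sum_alt a
instance (a : List ((Int × Int) × Int)) (out : List ((Int × Int) × Int)) : Decidable (Spec_collection_sum a out) := by unfold Spec_collection_sum; infer_instance

-- ===== CLAIM (what is proved, stated in full; the proofs are below) =====
def Claim_equal_collection_sum : Prop := ∀ (a : List ((Int × Int) × Int)), Dom_collection_sum a → Spec_collection_sum a (collection_sum a)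

-- ===== LEMMAS AND PROOFS =====

-- the total val*diff contributed by key k
def pvT (a : List ((Int × Int) × Int)) (k : Int) : Int :=
  ((a.filter (fun p => p.1.1 == k)).map (fun p => p.1.2 * p.2)).sum

lemma sums_getD (a : List ((Int × Int) × Int)) (d : PySem.Dict Int Int) (k : Int) :
    (a.foldl (fun d p => d.insert p.1.1 (d.getD p.1.1 0 + p.1.2 * p.2)) d).getD k 0
      = d.getD k 0 + pvT a k := by
  induction a generalizing d with
  | nil => simp [pvT]
  | cons p t ih =>
    simp only [List.foldl_cons, ih, PySem.Dict.getD_insert, pvT, List.filter_cons]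
    by_cases h : k = p.1.1
    · subst h; simp; ring
    · have h2 : ¬ p.1.1 = k := fun e => h e.symm
      simp [h, h2]

lemma group_getD (a : List ((Int × Int) × Int)) (k : Int) :
    (a.foldl (fun d p => d.modify p.1.1 [] (· ++ [(p.1.2, p.2)])) PySem.Dict.empty).getD k []
      = (a.filter (fun p => p.1.1 == k)).map (fun p => (p.1.2, p.2)) := by
  have h := PySem.Dict.getD_foldl_modify_append (l := a.map (fun p => (p.1.1, (p.1.2, p.2)))) (d := PySem.Dict.empty) (c := k)
  rw [List.foldl_map] at h
  simpa [List.filter_map, Function.comp] using h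

lemma consolidate_aux (l : List ((Int × Int) × Int)) :
    ∀ (d : PySem.Dict (Int × Int) Int),
    (∀ p ∈ l, d.contains p.1 = false) → (l.map (fun p => p.1)).Nodup →
    (l.foldl (fun d p => d.modify p.1 0 (· + p.2)) d).items = d.items ++ l := by
  induction l with
  | nil => simp
  | cons p t ih =>
    intro d hf hn
    simp only [List.map_cons, List.nodup_cons] at hn
    have hc : d.contains p.1 = false := hf p (by simp)
    have hmod : d.modify p.1 0 (· + p.2) = d.insert p.1 (d.getD p.1 0 + p.2) := rfl
    rw [List.foldl_cons, ih]
    · rw [hmod, PySem.Dict.items_insert_of_not_contains, PySem.Dict.getD_of_not_contains]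
      · simp
      · exact hc
      · exact hc
    · intro q hq
      rw [hmod, PySem.Dict.contains_insert]
      have : q.1 ≠ p.1 := fun e => hn.1 (e ▸ List.mem_map_of_mem hq)
      simp [this, hf q (by simp [hq])]
    · exact hn.2

lemma consolidate_fresh (l : List ((Int × Int) × Int)) (hn : (l.map (fun p => p.1)).Nodup) :
    collection_consolidate l = l.filter (fun p => p.2 != 0) := by
  unfold collection_consolidate
  show (List.filter (fun p => p.2 != 0) ((l.foldl (fun d p => d.modify p.1 0 (· + p.2)) PySem.Dict.empty).items)) = _
  rw [consolidate_aux l PySem.Dict.empty (fun p _ => PySem.Dict.contains_empty _) hn]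
  rfl

lemma flatMap_if_singleton (K : List Int) (c : Int → Bool) (h : Int → ((Int × Int) × Int)) :
    K.flatMap (fun k => if c k then [h k] else []) = (K.filter c).map h := by
  induction K with
  | nil => rfl
  | cons x t ih => by_cases hx : c x <;> simp [hx, ih]

lemma foldl_mul_add (vals : List (Int × Int)) (c : Int) :
    vals.foldl (fun s p => s + p.1 * p.2) c = c + (vals.map (fun p => p.1 * p.2)).sum := by
  induction vals generalizing c with
  | nil => simp
  | cons p t ih => simp [ih]; ring

theorem collection_sum_eq (a : List ((Int × Int) × Int)) :
    collection_sum a = collection_sum_alt a := by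
  unfold collection_sum collection_reduce collection_sum_alt
  set G := a.foldl (fun d p => d.modify p.1.1 [] (· ++ [(p.1.2, p.2)])) PySem.Dict.empty with hG
  set S := a.foldl (fun d p => d.insert p.1.1 (d.getD p.1.1 0 + p.1.2 * p.2)) PySem.Dict.empty with hS
  have hKeq : G.keys = S.keys := by
    rw [hG, hS, PySem.Dict.keys_foldl_modify_key, PySem.Dict.keys_foldl_insert_key]
    rfl
  have hGnd : G.keys.Nodup := by
    rw [hG]; exact PySem.Dict.nodup_keys_foldl_modify_key _ _ _ _ _ PySem.Dict.nodup_keys_empty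
  have hSnd : S.keys.Nodup := by rw [← hKeq]; exact hGnd
  have hGitems : G.items = G.keys.map (fun k => (k, (a.filter (fun p => p.1.1 == k)).map (fun p => (p.1.2, p.2)))) := by
    rw [PySem.Dict.items_eq_map_keys G hGnd []]
    exact List.map_congr_left (fun k _ => by rw [hG, group_getD])
  have hSitems : S.items = G.keys.map (fun k => (k, pvT a k)) := by
    rw [PySem.Dict.items_eq_map_keys S hSnd 0, ← hKeq]
    refine List.map_congr_left (fun k _ => ?_)
    rw [hS, sums_getD, PySem.Dict.getD_empty]
    simp
  dsimp only
  rw [PySem.List.foldl_append_eq_flatMap, hGitems, List.flatMap_map]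
  have hbody : (fun k => ((fun vals =>
        let out := vals.foldl (fun s p => s + p.1 * p.2) 0
        if out != 0 then [(out, 1)] else []) ((a.filter (fun p => p.1.1 == k)).map (fun p => (p.1.2, p.2)))).map
          (fun vd => ((k, vd.1), vd.2)))
      = (fun k => if pvT a k != 0 then [((k, pvT a k), (1:Int))] else []) := by
    funext k
    have hsum : (((a.filter (fun p => p.1.1 == k)).map (fun p => (p.1.2, p.2))).map (fun p => p.1 * p.2)).sum = pvT a k := by
      simp [pvT, Function.comp_def]
    dsimp only
    rw [foldl_mul_add, zero_add, hsum]
    by_cases h : pvT a k != 0 <;> simp [h]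
  rw [hbody, flatMap_if_singleton]
  have hnd2 : (((G.keys.filter (fun k => pvT a k != 0)).map (fun k => ((k, pvT a k), (1:Int)))).map (fun p => p.1)).Nodup := by
    rw [List.map_map]
    exact (hGnd.filter _).map (fun x y hxy => by simpa using congrArg Prod.fst hxy)
  rw [List.nil_append]
  rw [consolidate_fresh _ hnd2, hSitems]
  simp [List.filter_map, Function.comp_def]

-- ===== VERDICT (by name: the statement is the Claim_ definition above) =====
theorem collection_sum_spec : Claim_equal_collection_sum := by
  intro a _
  unfold Spec_collection_sum
  exact collection_sum_eq a
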